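-- pv_equiv track=rewrite | github.com/FalseNegativeLab/mlscorecheck | mlscorecheck/core/_folds.py | determine_fold_configurations
-- ===== SOURCE A (Python) =====
-- def stratified_configurations(n0, n1, n_splits):
--     n0_base = n0 // n_splits
--     n1_base = n1 // n_splits
--     n0_remainder = n0 % n_splits
--     n1_remainder = n1 % n_splits
--
--     results = [(n0_base, n1_base)] * n_splits
--
--     idx = 0
--     while n0_remainder > 0:
--         results[idx] = (results[idx][0] + 1, results[idx][1])
--         n0_remainder -= 1
--         idx += 1
--         idx = idx % n_splits
--     while n1_remainder > 0:
--         results[idx] = (results[idx][0], results[idx][1] + 1)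
--         n1_remainder -= 1
--         idx += 1
--         idx = idx % n_splits
--
--     return results
--
-- def determine_fold_configurations(p, n, n_folds, n_repeats):
--     confs = stratified_configurations(p, n, n_folds)
--     confs = [{'p': conf[0], 'n': conf[1]} for conf in confs]
--     results = []
--     for _ in range(n_repeats):
--         for item in confs:
--             results.append({**item})
--
--     return results
-- ===== SOURCE B (Python) =====
-- def determine_fold_configurations(p, n, n_folds, n_repeats):
--     pb, pr = divmod(p, n_folds)
--     nb, nr = divmod(n, n_folds)
--     base = [(pb + (1 if i < pr else 0), nb + (1 if (i - pr) % n_folds < nr else 0))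
--             for i in range(n_folds)]
--     return [{'p': a, 'n': b} for _ in range(n_repeats) for (a, b) in base]
-- ===== Notes on version B (the rewrite author's own statement) =====
-- stated objective: simpler
-- what changed: Replaces the mutating round-robin remainder loops with a per-fold closed form (p//f plus 1 for the first p%f folds; n//f plus 1 on a window offset by p%f) built by comprehensions, no in-place list mutation.
import Mathlib
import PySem

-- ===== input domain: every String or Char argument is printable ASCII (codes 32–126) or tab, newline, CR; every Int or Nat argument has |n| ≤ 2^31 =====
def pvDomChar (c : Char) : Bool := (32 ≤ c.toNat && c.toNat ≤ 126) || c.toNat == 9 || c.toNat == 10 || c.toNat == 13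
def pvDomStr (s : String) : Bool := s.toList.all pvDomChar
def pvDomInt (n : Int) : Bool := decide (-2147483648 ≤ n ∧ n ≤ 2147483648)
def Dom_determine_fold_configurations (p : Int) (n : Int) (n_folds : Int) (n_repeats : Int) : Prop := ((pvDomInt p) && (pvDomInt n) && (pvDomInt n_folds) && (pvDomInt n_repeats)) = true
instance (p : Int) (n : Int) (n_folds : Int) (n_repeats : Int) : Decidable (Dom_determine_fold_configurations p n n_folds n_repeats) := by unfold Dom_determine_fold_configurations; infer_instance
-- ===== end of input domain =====

-- B replaces A's mutating round-robin remainder loops with a per-fold closed form (simpler, no mutation).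

-- ===== PORT A =====
-- the round-robin `while remainder > 0` loop of stratified_configurations, fuel = remainder
-- (idx is provably nonnegative when the loop runs, so idx.toNat is exact here)
def rrLoop (upd : Int × Int → Int × Int) (f : Int) : Nat → List (Int × Int) → Int → List (Int × Int) × Int
  | 0, res, idx => (res, idx)
  | Nat.succ k, res, idx =>
      rrLoop upd f k (res.set idx.toNat (upd (res.getD idx.toNat (0, 0)))) (PySem.Int.mod (idx + 1) f)

def stratified_configurations (n0 : Int) (n1 : Int) (n_splits : Int) : List (Int × Int) :=
  let n0_base := PySem.Int.floordiv n0 n_splits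
  let n1_base := PySem.Int.floordiv n1 n_splits
  let n0_remainder := PySem.Int.mod n0 n_splits
  let n1_remainder := PySem.Int.mod n1 n_splits
  let results := List.replicate n_splits.toNat (n0_base, n1_base)
  let s1 := rrLoop (fun c => (c.1 + 1, c.2)) n_splits n0_remainder.toNat results 0
  let s2 := rrLoop (fun c => (c.1, c.2 + 1)) n_splits n1_remainder.toNat s1.1 s1.2
  s2.1

def determine_fold_configurations (p : Int) (n : Int) (n_folds : Int) (n_repeats : Int) : List (List (String × Int)) :=
  let confs := (stratified_configurations p n n_folds).map (fun conf => [("p", conf.1), ("n", conf.2)])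
  (PySem.List.pyRange 0 n_repeats 1).foldl
    (fun results _ => confs.foldl (fun acc item => acc ++ [item]) results) []

-- ===== PORT B =====
def determine_fold_configurations_alt (p : Int) (n : Int) (n_folds : Int) (n_repeats : Int) : List (List (String × Int)) :=
  let pb := PySem.Int.floordiv p n_folds
  let pr := PySem.Int.mod p n_folds
  let nb := PySem.Int.floordiv n n_folds
  let nr := PySem.Int.mod n n_folds
  let base := (PySem.List.pyRange 0 n_folds 1).map (fun i =>
      (pb + (if i < pr then 1 else 0), nb + (if PySem.Int.mod (i - pr) n_folds < nr then 1 else 0)))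
  (PySem.List.pyRange 0 n_repeats 1).flatMap (fun _ => base.map (fun c => [("p", c.1), ("n", c.2)]))

-- ===== PRECONDITION & SPEC =====
-- Pre_ excludes exactly n_folds = 0, where Python A raises ZeroDivisionError (B raises too).
def Pre_determine_fold_configurations (p : Int) (n : Int) (n_folds : Int) (n_repeats : Int) : Prop := n_folds ≠ 0
instance (p : Int) (n : Int) (n_folds : Int) (n_repeats : Int) : Decidable (Pre_determine_fold_configurations p n n_folds n_repeats) := by unfold Pre_determine_fold_configurations; infer_instance
def pvWitness_determine_fold_configurations : Int × Int × Int × Int := (7, 11, 3, 2)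

def Spec_determine_fold_configurations (p : Int) (n : Int) (n_folds : Int) (n_repeats : Int) (out : List (List (String × Int))) : Prop := out = determine_fold_configurations_alt p n n_folds n_repeats
instance (p : Int) (n : Int) (n_folds : Int) (n_repeats : Int) (out : List (List (String × Int))) : Decidable (Spec_determine_fold_configurations p n n_folds n_repeats out) := by unfold Spec_determine_fold_configurations; infer_instance

-- ===== CLAIM (what is proved, stated in full; the proofs are below) =====
def Claim_equal_determine_fold_configurations : Prop := ∀ (p : Int) (n : Int) (n_folds : Int) (n_repeats : Int), Dom_determine_fold_configurations p n n_folds n_repeats → Pre_determine_fold_configurations p n n_folds n_repeats → Spec_determine_fold_configurations p n n_folds n_repeats (determine_fold_configurations p n n_folds n_repeats)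

-- ===== LEMMAS AND PROOFS =====

theorem rrLoop_length (upd : Int × Int → Int × Int) (f : Int) :
    ∀ (k : Nat) (res : List (Int × Int)) (i : Int),
      ((rrLoop upd f k res i).1).length = res.length := by
  intro k
  induction k with
  | zero => intro res i; rfl
  | succ k ih => intro res i; simp [rrLoop, ih]

theorem rrLoop_snd (upd : Int × Int → Int × Int) (f : Int) (hf : 0 < f) :
    ∀ (k : Nat) (res : List (Int × Int)) (i : Int), 0 ≤ i → i < f →
      (rrLoop upd f k res i).2 = (i + k) % f := by
  intro k
  induction k with
  | zero =>
      intro res i hi hif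
      simp [rrLoop, Int.emod_eq_of_lt hi hif]
  | succ k ih =>
      intro res i hi hif
      simp only [rrLoop, PySem.Int.mod_eq_emod_of_pos hf]
      rw [ih _ _ (Int.emod_nonneg _ (by omega)) (Int.emod_lt_of_pos _ hf)]
      conv_lhs => rw [Int.add_emod, Int.emod_emod_of_dvd _ dvd_rfl, ← Int.add_emod]
      push_cast; ring_nf

theorem pv_emod_range (x f : Int) (_hf : 0 < f) (h1 : -f ≤ x) (h2 : x < f) :
    x % f = if 0 ≤ x then x else x + f := by
  split_ifs with h
  · exact Int.emod_eq_of_lt h h2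
  · conv_lhs => rw [show x = (x + f) + f * (-1) from by ring]
    rw [Int.add_mul_emod_self_left, Int.emod_eq_of_lt (by omega) (by omega)]

theorem rrLoop_getD (upd : Int × Int → Int × Int) (f : Int) (hf : 0 < f) :
    ∀ (k : Nat) (res : List (Int × Int)) (i : Int), 0 ≤ i → i < f → (k : Int) ≤ f →
      (res.length : Int) = f →
      ∀ (j : Nat), j < res.length →
        ((rrLoop upd f k res i).1).getD j (0, 0) =
          if ((j : Int) - i) % f < (k : Int) then upd (res.getD j (0, 0))
          else res.getD j (0, 0) := by
  intro k
  induction k with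
  | zero =>
      intro res i hi hif hk hlen j hj
      have hneg : ¬ (((j : Int) - i) % f < 0) :=
        not_lt.mpr (Int.emod_nonneg ((j : Int) - i) (by omega))
      simp [rrLoop, hneg]
  | succ k ih =>
      intro res i hi hif hk hlen j hj
      have hkf : (k : Int) + 1 ≤ f := by push_cast at hk; omega
      have hjf : (j : Int) < f := by omega
      have hilt : i.toNat < res.length := by omega
      have hmod : PySem.Int.mod (i + 1) f = (i + 1) % f := PySem.Int.mod_eq_emod_of_pos hf
      have hi'0 : 0 ≤ (i + 1) % f := Int.emod_nonneg _ (by omega)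
      have hi'f : (i + 1) % f < f := Int.emod_lt_of_pos _ hf
      have hi2 : (i + 1 = f ∧ (i + 1) % f = 0) ∨ (i + 1 ≠ f ∧ (i + 1) % f = i + 1) := by
        by_cases h : i + 1 = f
        · exact Or.inl ⟨h, by rw [h, Int.emod_self]⟩
        · exact Or.inr ⟨h, Int.emod_eq_of_lt (by omega) (by omega)⟩
      have hvset : ∀ (m : Nat), m < res.length →
          (res.set i.toNat (upd (res.getD i.toNat (0, 0)))).getD m (0, 0) =
            if m = i.toNat then upd (res.getD i.toNat (0, 0)) else res.getD m (0, 0) := by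
        intro m hm
        by_cases h : m = i.toNat
        · subst h
          rw [List.getD_eq_getElem?_getD, List.getElem?_set, if_pos rfl, if_pos hilt, if_pos rfl]
          rfl
        · rw [List.getD_eq_getElem?_getD, List.getElem?_set, if_neg (fun hh => h hh.symm),
            if_neg h, List.getD_eq_getElem?_getD]
      simp only [rrLoop, hmod]
      rw [ih _ _ hi'0 hi'f (by omega) (by simpa using hlen) j (by simpa using hj)]
      rw [hvset j hj]
      push_cast
      generalize hI : (i + 1) % f = i' at hi2 hi'0 hi'f ⊢
      have hb := pv_emod_range ((j : Int) - i') f hf (by omega) (by omega)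
      generalize hB : ((j : Int) - i') % f = b at hb ⊢
      have ha := pv_emod_range ((j : Int) - i) f hf (by omega) (by omega)
      generalize hA : ((j : Int) - i) % f = a at ha ⊢
      split_ifs at ha hb
      all_goals (
        by_cases hji : j = i.toNat
        · have hji' : (j : Int) = i := by omega
          rw [if_neg (by omega), if_pos hji, if_pos (by omega)]
          congr 1
          rw [hji]
        · have hjine : (j : Int) ≠ i := by omega
          rw [if_neg hji]
          by_cases hc : a < (k : Int) + 1
          · rw [if_pos (by omega), if_pos hc]
          · rw [if_neg (by omega), if_neg hc])

theorem strat_length (p n f : Int) :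
    (stratified_configurations p n f).length = f.toNat := by
  simp [stratified_configurations, rrLoop_length]

-- the closed form of A's stratified_configurations, element by element (positive n_splits)
theorem strat_getD (p n f : Int) (hf : 0 < f) (j : Nat) (hj : j < f.toNat) :
    (stratified_configurations p n f).getD j (0, 0) =
      (p / f + (if (j : Int) < p % f then 1 else 0),
       n / f + (if ((j : Int) - p % f) % f < n % f then 1 else 0)) := by
  have hflen : ((List.replicate f.toNat ((p / f : Int), (n / f : Int))).length : Int) = f := by
    simp; omega
  have hpr0 : 0 ≤ p % f := Int.emod_nonneg _ (by omega)
  have hprf : p % f < f := Int.emod_lt_of_pos _ hf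
  have hnr0 : 0 ≤ n % f := Int.emod_nonneg _ (by omega)
  have hnrf : n % f < f := Int.emod_lt_of_pos _ hf
  have hprc : (((p % f).toNat : Nat) : Int) = p % f := Int.toNat_of_nonneg hpr0
  have hnrc : (((n % f).toNat : Nat) : Int) = n % f := Int.toNat_of_nonneg hnr0
  have hrepl : ∀ (m : Nat), m < f.toNat →
      (List.replicate f.toNat ((p / f : Int), (n / f : Int))).getD m (0, 0) = (p / f, n / f) := by
    intro m hm
    rw [List.getD_eq_getElem?_getD, List.getElem?_replicate, if_pos hm]; rfl
  have hlen1 : (((rrLoop (fun c => (c.1 + 1, c.2)) f (p % f).toNat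
      (List.replicate f.toNat (p / f, n / f)) 0).1).length : Int) = f := by
    rw [rrLoop_length]; simpa using hflen
  have hsnd : (rrLoop (fun c => (c.1 + 1, c.2)) f (p % f).toNat
      (List.replicate f.toNat (p / f, n / f)) 0).2 = p % f := by
    rw [rrLoop_snd _ _ hf _ _ _ le_rfl hf, hprc, zero_add, Int.emod_eq_of_lt hpr0 hprf]
  have hjf : (j : Int) < f := by omega
  have hjlen1 : j < ((rrLoop (fun c => (c.1 + 1, c.2)) f (p % f).toNat
      (List.replicate f.toNat (p / f, n / f)) 0).1).length := by
    rw [rrLoop_length]; simpa using hj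
  simp only [stratified_configurations,
    PySem.Int.mod_eq_emod_of_pos hf, PySem.Int.floordiv_eq_ediv_of_pos hf, hsnd]
  rw [rrLoop_getD _ _ hf _ _ _ hpr0 hprf (by omega) hlen1 j hjlen1]
  rw [rrLoop_getD _ _ hf _ _ _ (by omega) hf (by omega) (by simpa using hflen) j (by simpa using hj)]
  rw [hrepl j hj]
  rw [hprc, hnrc]
  have hj0 : ((j : Int) - 0) % f = (j : Int) := by
    rw [sub_zero, Int.emod_eq_of_lt (by omega) hjf]
  rw [hj0]
  split_ifs <;> simp

-- A's fold list equals B's closed-form fold list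
theorem strat_eq_closed (p n f : Int) (hf : f ≠ 0) :
    stratified_configurations p n f =
      (PySem.List.pyRange 0 f 1).map (fun i =>
        (PySem.Int.floordiv p f + (if i < PySem.Int.mod p f then 1 else 0),
         PySem.Int.floordiv n f + (if PySem.Int.mod (i - PySem.Int.mod p f) f < PySem.Int.mod n f then 1 else 0))) := by
  rcases lt_or_gt_of_ne hf with hneg | hpos
  · have h1 : f.toNat = 0 := by omega
    have h2 : (PySem.Int.mod p f).toNat = 0 := by
      have := PySem.Int.mod_neg_bounds p hneg; omega
    have h3 : (PySem.Int.mod n f).toNat = 0 := by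
      have := PySem.Int.mod_neg_bounds n hneg; omega
    simp [stratified_configurations, h1, h2, h3, rrLoop,
      PySem.List.pyRange_one_eq_nil (by omega : f ≤ 0)]
  · apply List.ext_getElem
    · rw [strat_length, List.length_map, PySem.List.length_pyRange_one]
      omega
    · intro j hj hj'
      have hjf : j < f.toNat := by rwa [strat_length] at hj
      have hgd : (stratified_configurations p n f)[j] =
          (stratified_configurations p n f).getD j (0, 0) := by
        rw [List.getD_eq_getElem?_getD, List.getElem?_eq_getElem hj]; rfl
      rw [hgd, strat_getD p n f hpos j hjf]
      rw [List.getElem_map, PySem.List.getElem_pyRange_one]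
      simp only [PySem.Int.mod_eq_emod_of_pos hpos, PySem.Int.floordiv_eq_ediv_of_pos hpos,
        zero_add]

-- ===== VERDICT (by name: the statement is the Claim_ definition above) =====
theorem determine_fold_configurations_spec : Claim_equal_determine_fold_configurations := by
  intro p n n_folds n_repeats _ hpre
  unfold Spec_determine_fold_configurations
  simp only [determine_fold_configurations, determine_fold_configurations_alt]
  simp only [PySem.List.foldl_append_singleton_eq_self, PySem.List.foldl_append_eq_flatMap,
    List.nil_append]
  rw [strat_eq_closed p n n_folds hpre, List.map_map]
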